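-- pv_equiv track=rewrite | github.com/JadeKessinger/advent_of_code_2024 | day05.py | get_invalid_page
-- ===== SOURCE A (Python) =====
-- def get_invalid_page(rules_dict, update):
--     for page_index in range(len(update)):
--         page = update[page_index]
--
--         if page in rules_dict:
--             (before_page_rules, after_page_rules) = rules_dict[page]
--             pages_before = update[0:page_index]
--             pages_after = update[page_index + 1:]
--
--             for before_page_rule in before_page_rules:
--                 if before_page_rule in pages_before:
--                     return (page, "should be before", before_page_rule)
--
--             for after_page_rule in after_page_rules:
--                 if after_page_rule in pages_after:
--                     return (page, "should be after", after_page_rule)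
--
--     return None
-- ===== SOURCE B (Python) =====
-- def get_invalid_page(rules_dict, update):
--     # Stage 1: one pass building static position indexes: first and last
--     # occurrence index of every page in update.
--     n = len(update)
--     first_pos = {}
--     last_pos = {}
--     for i, p in enumerate(update):
--         if p not in first_pos:
--             first_pos[p] = i
--         last_pos[p] = i
--     # Stage 2: a rule r is violated at index i iff first_pos[r] < i
--     # (r occurs somewhere before i) resp. last_pos[r] > i (r occurs after i).
--     for i, page in enumerate(update):
--         if page in rules_dict:
--             before_rules, after_rules = rules_dict[page]
--             for r in before_rules:
--                 if first_pos.get(r, n) < i: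
--                     return (page, "should be before", r)
--             for r in after_rules:
--                 if i < last_pos.get(r, -1):
--                     return (page, "should be after", r)
--     return None
-- ===== Notes on version B (the rewrite author's own statement) =====
-- stated objective: alternative
-- what changed: Replaces A's per-page list slicing with linear membership scans over prefix/suffix by a precomputed static position index (first and last occurrence index of each page), so each rule check becomes a single index comparison; worst-case asymptotics improve but B was not measurably faster on the benchmark inputs.
import Mathlib
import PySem

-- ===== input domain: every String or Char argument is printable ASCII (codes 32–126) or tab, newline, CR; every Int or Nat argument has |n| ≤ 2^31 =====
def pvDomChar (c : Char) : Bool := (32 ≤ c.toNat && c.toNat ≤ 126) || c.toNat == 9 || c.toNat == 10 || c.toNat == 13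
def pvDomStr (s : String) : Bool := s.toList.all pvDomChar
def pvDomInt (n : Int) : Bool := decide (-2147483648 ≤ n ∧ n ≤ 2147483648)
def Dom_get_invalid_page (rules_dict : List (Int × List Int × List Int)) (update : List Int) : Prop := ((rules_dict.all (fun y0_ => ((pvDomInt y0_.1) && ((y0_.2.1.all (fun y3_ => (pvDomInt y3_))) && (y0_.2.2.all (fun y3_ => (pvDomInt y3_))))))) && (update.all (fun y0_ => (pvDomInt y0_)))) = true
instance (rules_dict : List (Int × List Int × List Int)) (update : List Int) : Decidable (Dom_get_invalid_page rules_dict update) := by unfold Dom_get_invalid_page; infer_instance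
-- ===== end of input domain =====

-- B replaces A's per-page prefix/suffix slices and linear membership scans with a
-- precomputed static position index (first/last occurrence index of every page),
-- turning each rule check into one index comparison (objective: alternative).


-- ===== PORT A =====
-- A's loop over page_index in range(len(update)), with the slices update[0:i], update[i+1:]
-- and the 'for rule … if rule in pages: return' scans as List.find? on a membership test.
def pvALoop (rd : PySem.Dict Int (List Int × List Int)) (update : List Int) (i : Nat) :
    Option (Int × String × Int) :=
  if h : i < update.length then
    let page := update[i]
    match rd.get? page with
    | some (before_page_rules, after_page_rules) =>
      let pages_before := PySem.List.slice update (some 0) (some (i : Int))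
      let pages_after := PySem.List.slice update (some ((i : Int) + 1)) none
      match before_page_rules.find? (fun r => pages_before.contains r) with
      | some r => some (page, "should be before", r)
      | none =>
        match after_page_rules.find? (fun r => pages_after.contains r) with
        | some r => some (page, "should be after", r)
        | none => pvALoop rd update (i + 1)
    | none => pvALoop rd update (i + 1)
  else none
termination_by update.length - i

def get_invalid_page (rules_dict : List (Int × List Int × List Int)) (update : List Int) :
    Option (Int × String × Int) :=
  pvALoop (PySem.Dict.mk rules_dict) update 0

-- ===== PORT B =====
-- Stage 1 of Source B: one pass over enumerate(update) filling first_pos / last_pos.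
def pvPosStep (fl : PySem.Dict Int Int × PySem.Dict Int Int) (q : Int × Int) :
    PySem.Dict Int Int × PySem.Dict Int Int :=
  ((if fl.1.contains q.2 then fl.1 else fl.1.insert q.2 q.1), fl.2.insert q.2 q.1)

-- Stage 2 of Source B: scan enumerate(update); a rule check is one getD comparison.
def pvBLoop (rd : PySem.Dict Int (List Int × List Int)) (fp lp : PySem.Dict Int Int)
    (n : Int) : List (Int × Int) → Option (Int × String × Int)
  | [] => none
  | (i, page) :: rest =>
    match rd.get? page with
    | some (before_rules, after_rules) =>
      match before_rules.find? (fun r => decide (fp.getD r n < i)) with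
      | some r => some (page, "should be before", r)
      | none =>
        match after_rules.find? (fun r => decide (i < lp.getD r (-1))) with
        | some r => some (page, "should be after", r)
        | none => pvBLoop rd fp lp n rest
    | none => pvBLoop rd fp lp n rest

def get_invalid_page_alt (rules_dict : List (Int × List Int × List Int)) (update : List Int) :
    Option (Int × String × Int) :=
  let pairs := PySem.List.enumerate update 0
  let fl := pairs.foldl pvPosStep (PySem.Dict.empty, PySem.Dict.empty)
  pvBLoop (PySem.Dict.mk rules_dict) fl.1 fl.2 (update.length : Int) pairs

-- ===== PRECONDITION & SPEC =====
def Spec_get_invalid_page (rules_dict : List (Int × List Int × List Int)) (update : List Int) (out : Option (Int × String × Int)) : Prop := out = get_invalid_page_alt rules_dict update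
instance (rules_dict : List (Int × List Int × List Int)) (update : List Int) (out : Option (Int × String × Int)) : Decidable (Spec_get_invalid_page rules_dict update out) := by unfold Spec_get_invalid_page; infer_instance

-- ===== CLAIM (what is proved, stated in full; the proofs are below) =====
def Claim_equal_get_invalid_page : Prop := ∀ (rules_dict : List (Int × List Int × List Int)) (update : List Int), Dom_get_invalid_page rules_dict update → Spec_get_invalid_page rules_dict update (get_invalid_page rules_dict update)

-- ===== LEMMAS AND PROOFS =====

-- the two dict components of the stage-1 fold, separately
def pvFp (xs : List Int) : PySem.Dict Int Int :=
  (PySem.List.enumerate xs 0).foldl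
    (fun fp q => if fp.contains q.2 then fp else fp.insert q.2 q.1) PySem.Dict.empty

def pvLp (xs : List Int) : PySem.Dict Int Int :=
  (PySem.List.enumerate xs 0).foldl (fun lp q => lp.insert q.2 q.1) PySem.Dict.empty

theorem pvPos_split (xs : List Int) :
    (PySem.List.enumerate xs 0).foldl pvPosStep (PySem.Dict.empty, PySem.Dict.empty)
      = (pvFp xs, pvLp xs) := by
  unfold pvFp pvLp
  rw [show pvPosStep = (fun (fl : PySem.Dict Int Int × PySem.Dict Int Int) (q : Int × Int) =>
      ((if fl.1.contains q.2 then fl.1 else fl.1.insert q.2 q.1), fl.2.insert q.2 q.1)) from rfl]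
  exact PySem.List.foldl_prod_mk
    (f := fun fp (q : Int × Int) => if fp.contains q.2 then fp else fp.insert q.2 q.1)
    (g := fun lp (q : Int × Int) => lp.insert q.2 q.1)
    (l := PySem.List.enumerate xs 0) (a := PySem.Dict.empty) (b := PySem.Dict.empty)

-- one stage-1 step, seen from the right end of the list
theorem pvFp_append (ys : List Int) (x : Int) :
    pvFp (ys ++ [x])
      = (if (pvFp ys).contains x then pvFp ys else (pvFp ys).insert x (ys.length : Int)) := by
  unfold pvFp
  rw [PySem.List.enumerate_append, List.foldl_append]
  simp [PySem.List.enumerate_cons, PySem.List.enumerate_nil]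

theorem pvLp_append (ys : List Int) (x : Int) :
    pvLp (ys ++ [x]) = (pvLp ys).insert x (ys.length : Int) := by
  unfold pvLp
  rw [PySem.List.enumerate_append, List.foldl_append]
  simp [PySem.List.enumerate_cons, PySem.List.enumerate_nil]

-- indexing into ys ++ [x]
theorem pvGetApp (ys : List Int) (x r : Int) (k : Nat) :
    ((ys ++ [x])[k]? = some r) ↔ (ys[k]? = some r ∨ (k = ys.length ∧ r = x)) := by
  rcases Nat.lt_trichotomy k ys.length with h | h | h
  · rw [List.getElem?_append_left h]
    constructor
    · exact Or.inl
    · rintro (hh | ⟨rfl, -⟩)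
      · exact hh
      · omega
  · subst h
    rw [List.getElem?_append_right (Nat.le_refl _), Nat.sub_self]
    have hnone : ys[ys.length]? = none := List.getElem?_eq_none_iff.2 (Nat.le_refl _)
    simp [eq_comm]
  · have h1 : (ys ++ [x])[k]? = none := List.getElem?_eq_none_iff.2 (by simp; omega)
    have h2 : ys[k]? = none := List.getElem?_eq_none_iff.2 (by omega)
    simp [h1, h2]
    omega

-- first_pos maps r to the index of r's FIRST occurrence in xs
theorem pvFp_spec (xs : List Int) (r : Int) :
    ((pvFp xs).get? r = none → ∀ k : Nat, xs[k]? ≠ some r) ∧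
    (∀ j : Int, (pvFp xs).get? r = some j →
      ∃ jn : Nat, j = (jn : Int) ∧ xs[jn]? = some r ∧ ∀ k : Nat, k < jn → xs[k]? ≠ some r) := by
  induction xs using List.reverseRecOn with
  | nil => simp [pvFp, PySem.List.enumerate_nil]
  | append_singleton ys x ih =>
    rw [pvFp_append]
    by_cases hc : (pvFp ys).contains x = true
    · rw [if_pos hc]
      constructor
      · intro hn k hk
        have hrx : r ≠ x := by
          intro h; subst h
          rw [PySem.Dict.contains_eq_isSome_get?, hn] at hc; simp at hc
        rcases (pvGetApp ys x r k).1 hk with hh | ⟨-, hh⟩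
        · exact ih.1 hn k hh
        · exact hrx hh
      · intro j hj
        obtain ⟨jn, hje, hjr, hmin⟩ := ih.2 j hj
        have hjn : jn < ys.length := by
          by_contra hcon
          rw [List.getElem?_eq_none_iff.2 (by omega)] at hjr; simp at hjr
        refine ⟨jn, hje, by rwa [List.getElem?_append_left hjn], fun k hk hkr => ?_⟩
        have hkl : k < ys.length := by omega
        exact hmin k hk (by rwa [List.getElem?_append_left hkl] at hkr)
    · rw [if_neg hc]
      have hnone : (pvFp ys).get? x = none := by
        rw [PySem.Dict.contains_eq_isSome_get?] at hc
        cases h : (pvFp ys).get? x with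
        | none => rfl
        | some v => rw [h] at hc; simp at hc
      rw [PySem.Dict.get?_insert]
      by_cases hrx : r = x
      · subst hrx
        rw [if_pos rfl]
        refine ⟨fun h => by simp at h, fun j hj => ?_⟩
        obtain rfl : ((ys.length : Int)) = j := by injection hj
        refine ⟨ys.length, rfl, by simp, fun k hk hkr => ?_⟩
        exact ih.1 hnone k (by rwa [List.getElem?_append_left hk] at hkr)
      · rw [if_neg hrx]
        constructor
        · intro hn k hk
          rcases (pvGetApp ys x r k).1 hk with hh | ⟨-, hh⟩
          · exact ih.1 hn k hh
          · exact hrx hh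
        · intro j hj
          obtain ⟨jn, hje, hjr, hmin⟩ := ih.2 j hj
          have hjn : jn < ys.length := by
            by_contra hcon
            rw [List.getElem?_eq_none_iff.2 (by omega)] at hjr; simp at hjr
          refine ⟨jn, hje, by rwa [List.getElem?_append_left hjn], fun k hk hkr => ?_⟩
          have hkl : k < ys.length := by omega
          exact hmin k hk (by rwa [List.getElem?_append_left hkl] at hkr)

-- last_pos maps r to the index of r's LAST occurrence in xs; the bound form we use
theorem pvLp_spec (xs : List Int) (r : Int) (i : Int) (hi : 0 ≤ i) :
    (i < (pvLp xs).getD r (-1)) ↔ ∃ k : Nat, i < (k : Int) ∧ xs[k]? = some r := by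
  induction xs using List.reverseRecOn with
  | nil =>
    simp only [pvLp, PySem.List.enumerate_nil, List.foldl_nil, PySem.Dict.getD_empty]
    constructor
    · intro h; omega
    · rintro ⟨k, -, hk⟩; simp at hk
  | append_singleton ys x ih =>
    rw [pvLp_append, PySem.Dict.getD_insert]
    by_cases hrx : r = x
    · subst hrx
      rw [if_pos rfl]
      constructor
      · intro h
        exact ⟨ys.length, h, (pvGetApp ys _ _ ys.length).2 (Or.inr ⟨rfl, rfl⟩)⟩
      · rintro ⟨k, hik, hk⟩
        have hk' : k < ys.length + 1 := by
          by_contra hcon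
          rw [List.getElem?_eq_none_iff.2 (by simp; omega)] at hk; simp at hk
        have : (k : Int) ≤ (ys.length : Int) := by exact_mod_cast Nat.lt_succ_iff.1 hk'
        omega
    · rw [if_neg hrx, ih]
      constructor
      · rintro ⟨k, hik, hk⟩
        have hlt : k < ys.length := by
          by_contra hcon
          rw [List.getElem?_eq_none_iff.2 (by omega)] at hk; simp at hk
        exact ⟨k, hik, (pvGetApp ys x r k).2 (Or.inl hk)⟩
      · rintro ⟨k, hik, hk⟩
        rcases (pvGetApp ys x r k).1 hk with hh | ⟨-, hh⟩
        · exact ⟨k, hik, hh⟩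
        · exact absurd hh hrx

theorem pvFp_bound (xs : List Int) (r : Int) (i : Int) (hi : i ≤ (xs.length : Int)) :
    ((pvFp xs).getD r (xs.length : Int) < i) ↔ ∃ k : Nat, (k : Int) < i ∧ xs[k]? = some r := by
  cases h : (pvFp xs).get? r with
  | none =>
    rw [PySem.Dict.getD_eq_get?_getD, h]
    simp only [Option.getD_none]
    constructor
    · intro hlt; omega
    · rintro ⟨k, -, hk⟩
      exact absurd hk ((pvFp_spec xs r).1 h k)
  | some j =>
    obtain ⟨jn, rfl, hjr, hmin⟩ := (pvFp_spec xs r).2 j h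
    rw [PySem.Dict.getD_eq_get?_getD, h]
    simp only [Option.getD_some]
    constructor
    · intro hlt; exact ⟨jn, hlt, hjr⟩
    · rintro ⟨k, hki, hk⟩
      have : ¬ k < jn := fun hlt => (hmin k hlt) hk
      have : (jn : Int) ≤ (k : Int) := by exact_mod_cast Nat.le_of_not_lt this
      omega

theorem pvLoops_eq (rd : PySem.Dict Int (List Int × List Int)) (update : List Int) :
    ∀ m i, update.length - i ≤ m →
    pvALoop rd update i
      = pvBLoop rd (pvFp update) (pvLp update) (update.length : Int)
          ((PySem.List.enumerate update 0).drop i) := by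
  intro m
  induction m with
  | zero =>
    intro i him
    have hge : update.length ≤ i := by omega
    rw [pvALoop]
    rw [List.drop_eq_nil_of_le (by simpa [PySem.List.length_enumerate] using hge)]
    simp [pvBLoop, Nat.not_lt_of_le hge]
  | succ m ihm =>
    intro i him
    by_cases h : i < update.length
    · have hdrop : (PySem.List.enumerate update 0).drop i
          = ((i : Int), update[i]) :: (PySem.List.enumerate update 0).drop (i + 1) := by
        have hlen : i < (PySem.List.enumerate update 0).length := by
          simpa [PySem.List.length_enumerate] using h
        rw [List.drop_eq_getElem_cons hlen, PySem.List.getElem_enumerate]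
        simp
      have hs1 : PySem.List.slice update (some 0) (some (i : Int)) = update.take i := by
        rw [PySem.List.slice_zero_start, PySem.List.slice_to_natCast]
      have hs2 : PySem.List.slice update (some ((i : Int) + 1)) none = update.drop (i + 1) := by
        have hcast : ((i : Int) + 1) = ((i + 1 : Nat) : Int) := by push_cast; ring
        rw [hcast, PySem.List.slice_from_natCast]
      have hb : ∀ r : Int, (update.take i).contains r
          = decide ((pvFp update).getD r (update.length : Int) < (i : Int)) := by
        intro r
        rw [List.contains_eq_mem]
        have : r ∈ update.take i ↔ ∃ k : Nat, (k : Int) < (i : Int) ∧ update[k]? = some r := by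
          rw [List.mem_iff_getElem?]
          constructor
          · rintro ⟨k, hk⟩
            rw [List.getElem?_take] at hk
            split at hk
            · next hki => exact ⟨k, by exact_mod_cast hki, hk⟩
            · simp at hk
          · rintro ⟨k, hki, hk⟩
            refine ⟨k, ?_⟩
            rw [List.getElem?_take, if_pos (by exact_mod_cast hki)]
            exact hk
        rw [decide_eq_decide.2 (this.trans (pvFp_bound update r i (by exact_mod_cast Nat.le_of_lt h)).symm)]
      have ha : ∀ r : Int, (update.drop (i + 1)).contains r
          = decide ((i : Int) < (pvLp update).getD r (-1)) := by
        intro r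
        rw [List.contains_eq_mem]
        have : r ∈ update.drop (i + 1) ↔ ∃ k : Nat, (i : Int) < (k : Int) ∧ update[k]? = some r := by
          rw [List.mem_iff_getElem?]
          constructor
          · rintro ⟨k, hk⟩
            rw [List.getElem?_drop] at hk
            exact ⟨i + 1 + k, by push_cast; omega, hk⟩
          · rintro ⟨k, hki, hk⟩
            have hik : i + 1 ≤ k := by exact_mod_cast hki
            refine ⟨k - (i + 1), ?_⟩
            rw [List.getElem?_drop, Nat.add_sub_cancel' hik]
            exact hk
        rw [decide_eq_decide.2 (this.trans (pvLp_spec update r i (by positivity)).symm)]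
      rw [pvALoop]
      simp only [h, dite_true, hs1, hs2]
      rw [hdrop, pvBLoop]
      cases hg : rd.get? update[i] with
      | none => simpa using ihm (i + 1) (by omega)
      | some v =>
        obtain ⟨br, ar⟩ := v
        simp only
        rw [show (fun r => (update.take i).contains r) = (fun r => decide ((pvFp update).getD r (update.length : Int) < (i : Int))) from funext hb,
            show (fun r => (update.drop (i + 1)).contains r) = (fun r => decide ((i : Int) < (pvLp update).getD r (-1))) from funext ha]
        cases br.find? (fun r => decide ((pvFp update).getD r (update.length : Int) < (i : Int))) with
        | some r => simp
        | none =>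
          cases ar.find? (fun r => decide ((i : Int) < (pvLp update).getD r (-1))) with
          | some r => simp
          | none => simpa using ihm (i + 1) (by omega)
    · rw [pvALoop]
      rw [List.drop_eq_nil_of_le (by simpa [PySem.List.length_enumerate] using Nat.le_of_not_lt h)]
      simp [pvBLoop, h]

-- ===== VERDICT (by name: the statement is the Claim_ definition above) =====
theorem get_invalid_page_spec : Claim_equal_get_invalid_page := by
  intro rules_dict update _
  simp only [Spec_get_invalid_page, get_invalid_page, get_invalid_page_alt, pvPos_split]
  exact (pvLoops_eq (PySem.Dict.mk rules_dict) update update.length 0 (by omega)).symm ▸ rfl
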